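-- pv_equiv track=rewrite | github.com/speedyangela/projet_fmad | src/polarisation.py | calcul_dist_approbation
-- ===== SOURCE A (Python) =====
-- def calcul_dist_approbation(profil):
--     n=len(profil)  #nombre de votants
--     m=len(profil[0]) #nombre de candidats
--     distances={}
--     #on parcourt les paires de candidats(k,l)
--     for k in range(m):
--         for l in range(k+1,m): #on commence à k+1 pour pas comparer un candidat avec lui-même
--             n_kl=0 #nombre de prsn qui preferent k à l
--             n_lk=0 #// l à k
--             for v in range(n): #on analyse chaque bulletin
--                 bulletin=profil[v]
--                 if bulletin[k]==1 and bulletin[l]==0: #si le votant approuve k et pas l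
--                     n_kl+=1
--                 elif bulletin[k]==0 and bulletin[l]==1: #// l et pas k
--                     n_lk+=1
--             d_kl=abs(n_kl-n_lk)
--             distances[(k,l)]=d_kl #on stocke la distance dans le dico associé au comparatif k et l
--     return distances
-- ===== SOURCE B (Python) =====
-- def calcul_dist_approbation(profil):
--     # Voter-major single pass: keep one signed running difference per candidate
--     # pair in a vector parallel to the (ordered) pair list; take abs at the end.
--     m = len(profil[0])
--     pairs = [(k, l) for k in range(m) for l in range(k + 1, m)]
--     acc = [0] * len(pairs)
--     for bulletin in profil:
--         acc = [d + (bulletin[k] == 1 and bulletin[l] == 0)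
--                  - (bulletin[k] == 0 and bulletin[l] == 1)
--                for d, (k, l) in zip(acc, pairs)]
--     return {p: abs(d) for p, d in zip(pairs, acc)}
-- ===== Notes on version B (the rewrite author's own statement) =====
-- stated objective: alternative
-- what changed: Transposed traversal: instead of re-scanning the whole profile for each candidate pair with two counters, B makes one voter-major pass that updates a vector of signed preference differences (one per ordered pair, kept parallel to the pair list) and takes absolute values at the end.
import Mathlib
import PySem

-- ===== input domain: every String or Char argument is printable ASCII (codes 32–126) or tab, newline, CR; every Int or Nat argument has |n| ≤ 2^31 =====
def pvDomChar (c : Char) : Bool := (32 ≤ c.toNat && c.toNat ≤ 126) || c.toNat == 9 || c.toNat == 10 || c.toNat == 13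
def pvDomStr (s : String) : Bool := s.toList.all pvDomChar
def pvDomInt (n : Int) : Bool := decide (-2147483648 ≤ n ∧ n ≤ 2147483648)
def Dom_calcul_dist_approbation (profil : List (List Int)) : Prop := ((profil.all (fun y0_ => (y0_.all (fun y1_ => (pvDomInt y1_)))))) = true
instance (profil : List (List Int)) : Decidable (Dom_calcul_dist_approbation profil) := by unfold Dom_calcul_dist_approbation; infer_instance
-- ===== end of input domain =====

-- B replaces A's pair-major rescan of the whole profile (two counters per pair)
-- by one voter-major pass over a vector of signed per-pair differences; same
-- complexity, different traversal ("alternative" objective). Proved equal on Pre_.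

-- ===== PORT A =====
def calcul_dist_approbation (profil : List (List Int)) : List (Int × Int × Int) :=
  let n : Int := profil.length
  let m : Int := (PySem.List.pyGetD profil 0 []).length
  let distances : PySem.Dict (Int × Int) Int :=
    (PySem.List.pyRange 0 m 1).foldl (fun distances k =>
      (PySem.List.pyRange (k + 1) m 1).foldl (fun distances l =>
        let counts : Int × Int :=
          (PySem.List.pyRange 0 n 1).foldl (fun counts v =>
            let bulletin := PySem.List.pyGetD profil v []
            if PySem.List.pyGetD bulletin k 0 = 1 ∧ PySem.List.pyGetD bulletin l 0 = 0 then
              (counts.1 + 1, counts.2)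
            else if PySem.List.pyGetD bulletin k 0 = 0 ∧ PySem.List.pyGetD bulletin l 0 = 1 then
              (counts.1, counts.2 + 1)
            else counts) (0, 0)
        distances.insert (k, l) |counts.1 - counts.2|) distances) PySem.Dict.empty
  distances.items.map (fun q => (q.1.1, q.1.2, q.2))

-- ===== PORT B =====
def calcul_dist_approbation_alt (profil : List (List Int)) : List (Int × Int × Int) :=
  let m : Int := (PySem.List.pyGetD profil 0 []).length
  let pairs : List (Int × Int) :=
    (PySem.List.pyRange 0 m 1).flatMap (fun k =>
      (PySem.List.pyRange (k + 1) m 1).map (fun l => (k, l)))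
  let acc0 : List Int := List.replicate pairs.length 0
  let acc : List Int := profil.foldl (fun acc bulletin =>
      (acc.zip pairs).map (fun q =>
        q.1 + (if PySem.List.pyGetD bulletin q.2.1 0 = 1 ∧ PySem.List.pyGetD bulletin q.2.2 0 = 0 then 1 else 0)
            - (if PySem.List.pyGetD bulletin q.2.1 0 = 0 ∧ PySem.List.pyGetD bulletin q.2.2 0 = 1 then 1 else 0))) acc0
  let result : PySem.Dict (Int × Int) Int :=
    (pairs.zip acc).foldl (fun d q => d.insert q.1 |q.2|) PySem.Dict.empty
  result.items.map (fun q => (q.1.1, q.1.2, q.2))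

-- ===== PRECONDITION & SPEC =====
-- Pre_ excludes exactly the inputs where Python A raises IndexError: the empty
-- profile (profil[0]) and, when there are at least two candidates (m ≥ 2), a
-- ballot that is more than one entry short, or exactly one entry short while
-- containing a 0 or a 1 (then some bulletin[k]/bulletin[l] is out of range;
-- a ballot of length m-1 whose entries are all outside {0,1} never evaluates
-- bulletin[m-1], because 'and' short-circuits).
def Pre_calcul_dist_approbation (profil : List (List Int)) : Prop :=
  profil ≠ [] ∧ (2 ≤ profil.headI.length → ∀ b ∈ profil,
    profil.headI.length ≤ b.length ∨
    (b.length + 1 = profil.headI.length ∧ ∀ x ∈ b, x ≠ 0 ∧ x ≠ 1))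
instance (profil : List (List Int)) : Decidable (Pre_calcul_dist_approbation profil) := by
  unfold Pre_calcul_dist_approbation; infer_instance

def pvWitness_calcul_dist_approbation : List (List Int) := [[1, 0], [0, 1], [1, 1]]

def Spec_calcul_dist_approbation (profil : List (List Int)) (out : List (Int × Int × Int)) : Prop := out = calcul_dist_approbation_alt profil
instance (profil : List (List Int)) (out : List (Int × Int × Int)) : Decidable (Spec_calcul_dist_approbation profil out) := by unfold Spec_calcul_dist_approbation; infer_instance

-- ===== CLAIM (what is proved, stated in full; the proofs are below) =====
def Claim_equal_calcul_dist_approbation : Prop := ∀ (profil : List (List Int)), Dom_calcul_dist_approbation profil → Pre_calcul_dist_approbation profil → Spec_calcul_dist_approbation profil (calcul_dist_approbation profil)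

-- ===== LEMMAS AND PROOFS =====

-- the two 0/1 indicators of A's if/elif, as functions of a pair
def pvI1 (b : List Int) (p : Int × Int) : Int :=
  if PySem.List.pyGetD b p.1 0 = 1 ∧ PySem.List.pyGetD b p.2 0 = 0 then 1 else 0
def pvI2 (b : List Int) (p : Int × Int) : Int :=
  if PySem.List.pyGetD b p.1 0 = 0 ∧ PySem.List.pyGetD b p.2 0 = 1 then 1 else 0

def pvPairs (m : Int) : List (Int × Int) :=
  (PySem.List.pyRange 0 m 1).flatMap (fun k =>
    (PySem.List.pyRange (k + 1) m 1).map (fun l => (k, l)))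

theorem pv_nodup_pairs (m : Int) : (pvPairs m).Nodup := by
  unfold pvPairs
  rw [List.nodup_flatMap]
  constructor
  · intro k _
    refine (PySem.List.nodup_pyRange_one _ _).map ?_
    intro a b h
    simpa using congrArg Prod.snd h
  · refine (PySem.List.nodup_pyRange_one 0 m).pairwise_of_forall_ne ?_
    intro k k' _ _ hne
    simp only [List.disjoint_left, List.mem_map]
    rintro p ⟨l, _, rfl⟩ ⟨l', _, h⟩
    have hk := congrArg Prod.fst h
    simp at hk
    exact hne hk.symm

theorem pv_foldl_flatMap {α β γ : Type} (l : List α) (g : α → List β) (f : γ → β → γ) (i : γ) :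
    (l.flatMap g).foldl f i = l.foldl (fun a x => (g x).foldl f a) i := by
  induction l generalizing i with
  | nil => rfl
  | cons h t ih => simp only [List.flatMap_cons, List.foldl_append, List.foldl_cons, ih]

theorem pv_zip_map_left {α β : Type} (l : List α) (f : α → β) :
    (l.map f).zip l = l.map (fun x => (f x, x)) := by
  induction l <;> simp [*]

theorem pv_zip_map_right {α β : Type} (l : List α) (f : α → β) :
    l.zip (l.map f) = l.map (fun x => (x, f x)) := by
  induction l <;> simp [*]

theorem pv_sum_map_sub {α : Type} (l : List α) (f g : α → Int) :
    (l.map (fun x => f x - g x)).sum = (l.map f).sum - (l.map g).sum := by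
  induction l with
  | nil => simp
  | cons h t ih => simp [ih]; ring

-- A's inner voter loop characterised: it adds the two indicator sums to the counters
theorem pv_count_loop (p : Int × Int) (profil : List (List Int)) (c : Int × Int) :
    profil.foldl (fun counts b =>
        if PySem.List.pyGetD b p.1 0 = 1 ∧ PySem.List.pyGetD b p.2 0 = 0 then
          (counts.1 + 1, counts.2)
        else if PySem.List.pyGetD b p.1 0 = 0 ∧ PySem.List.pyGetD b p.2 0 = 1 then
          (counts.1, counts.2 + 1)
        else counts) c
      = (c.1 + (profil.map (fun b => pvI1 b p)).sum, c.2 + (profil.map (fun b => pvI2 b p)).sum) := by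
  induction profil generalizing c with
  | nil => simp
  | cons b t ih =>
    rw [List.foldl_cons, List.map_cons, List.map_cons, List.sum_cons, List.sum_cons]
    by_cases h1 : PySem.List.pyGetD b p.1 0 = 1 ∧ PySem.List.pyGetD b p.2 0 = 0
    · have e1 : pvI1 b p = 1 := by simp [pvI1, h1]
      have e2 : pvI2 b p = 0 := by
        simp only [pvI2, ite_eq_right_iff]
        rintro ⟨ha, -⟩; rw [h1.1] at ha; norm_num at ha
      rw [if_pos h1, ih, e1, e2, Prod.mk.injEq]
      constructor <;> ring
    · rw [if_neg h1]
      have e1 : pvI1 b p = 0 := by simp [pvI1, h1]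
      by_cases h2 : PySem.List.pyGetD b p.1 0 = 0 ∧ PySem.List.pyGetD b p.2 0 = 1
      · have e2 : pvI2 b p = 1 := by simp [pvI2, h2]
        rw [if_pos h2, ih, e1, e2, Prod.mk.injEq]
        constructor <;> ring
      · have e2 : pvI2 b p = 0 := by simp [pvI2, h2]
        rw [if_neg h2, ih, e1, e2, Prod.mk.injEq]
        constructor <;> ring

-- A's result in closed form
theorem pv_A_eq (profil : List (List Int)) :
    calcul_dist_approbation profil =
      (pvPairs ((PySem.List.pyGetD profil 0 []).length : Int)).map (fun p =>
        (p.1, p.2, |(profil.map (fun b => pvI1 b p)).sum - (profil.map (fun b => pvI2 b p)).sum|)) := by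
  simp only [calcul_dist_approbation]
  have hbody :
      (PySem.List.pyRange 0 ((PySem.List.pyGetD profil 0 []).length : Int) 1).foldl (fun distances k =>
        (PySem.List.pyRange (k + 1) ((PySem.List.pyGetD profil 0 []).length : Int) 1).foldl (fun distances l =>
          distances.insert (k, l)
            |((PySem.List.pyRange 0 (profil.length : Int) 1).foldl (fun counts v =>
                if PySem.List.pyGetD (PySem.List.pyGetD profil v []) k 0 = 1 ∧
                    PySem.List.pyGetD (PySem.List.pyGetD profil v []) l 0 = 0 then
                  (counts.1 + 1, counts.2)
                else if PySem.List.pyGetD (PySem.List.pyGetD profil v []) k 0 = 0 ∧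
                    PySem.List.pyGetD (PySem.List.pyGetD profil v []) l 0 = 1 then
                  (counts.1, counts.2 + 1)
                else counts) ((0 : Int), (0 : Int))).1 -
              ((PySem.List.pyRange 0 (profil.length : Int) 1).foldl (fun counts v =>
                if PySem.List.pyGetD (PySem.List.pyGetD profil v []) k 0 = 1 ∧
                    PySem.List.pyGetD (PySem.List.pyGetD profil v []) l 0 = 0 then
                  (counts.1 + 1, counts.2)
                else if PySem.List.pyGetD (PySem.List.pyGetD profil v []) k 0 = 0 ∧
                    PySem.List.pyGetD (PySem.List.pyGetD profil v []) l 0 = 1 then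
                  (counts.1, counts.2 + 1)
                else counts) ((0 : Int), (0 : Int))).2|) distances) PySem.Dict.empty
      = (pvPairs ((PySem.List.pyGetD profil 0 []).length : Int)).foldl (fun d p =>
          d.insert p |(profil.map (fun b => pvI1 b p)).sum - (profil.map (fun b => pvI2 b p)).sum|)
          PySem.Dict.empty := by
    unfold pvPairs
    rw [pv_foldl_flatMap]
    refine PySem.List.foldl_congr_mem _ _ _ _ ?_
    intro acc k _
    rw [List.foldl_map]
    refine PySem.List.foldl_congr_mem _ _ _ _ ?_
    intro acc' l _
    rw [PySem.List.foldl_pyRange_zero_pyGetD' profil []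
      (fun counts bulletin =>
        if PySem.List.pyGetD bulletin k 0 = 1 ∧ PySem.List.pyGetD bulletin l 0 = 0 then
          (counts.1 + 1, counts.2)
        else if PySem.List.pyGetD bulletin k 0 = 0 ∧ PySem.List.pyGetD bulletin l 0 = 1 then
          (counts.1, counts.2 + 1)
        else counts) ((0 : Int), (0 : Int))]
    rw [pv_count_loop (k, l) profil ((0 : Int), (0 : Int))]
    norm_num
  rw [hbody]
  rw [PySem.Dict.items_foldl_insert_fresh _ (fun p => p) _ _
    (fun p _ => PySem.Dict.contains_empty _) (by simpa using pv_nodup_pairs _),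
    show (PySem.Dict.empty : PySem.Dict (Int × Int) Int).items = [] from rfl]
  simp [List.map_map, Function.comp_def]

-- B's voter loop characterised: the accumulator stays parallel to the pair list
theorem pv_acc_loop (ps : List (Int × Int)) (profil : List (List Int)) (f : (Int × Int) → Int) :
    profil.foldl (fun acc bulletin =>
        (acc.zip ps).map (fun q =>
          q.1 + (if PySem.List.pyGetD bulletin q.2.1 0 = 1 ∧ PySem.List.pyGetD bulletin q.2.2 0 = 0 then 1 else 0)
              - (if PySem.List.pyGetD bulletin q.2.1 0 = 0 ∧ PySem.List.pyGetD bulletin q.2.2 0 = 1 then 1 else 0))) (ps.map f)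
      = ps.map (fun p => f p + (profil.map (fun b => pvI1 b p - pvI2 b p)).sum) := by
  induction profil generalizing f with
  | nil => simp
  | cons b t ih =>
    rw [List.foldl_cons, pv_zip_map_left, List.map_map]
    have hfun : ((fun q : Int × (Int × Int) =>
          q.1 + (if PySem.List.pyGetD b q.2.1 0 = 1 ∧ PySem.List.pyGetD b q.2.2 0 = 0 then (1 : Int) else 0)
              - (if PySem.List.pyGetD b q.2.1 0 = 0 ∧ PySem.List.pyGetD b q.2.2 0 = 1 then (1 : Int) else 0))
          ∘ (fun p : Int × Int => (f p, p)))
        = (fun p => f p + (pvI1 b p - pvI2 b p)) := by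
      funext p
      simp only [Function.comp_apply, pvI1, pvI2]
      ring
    rw [hfun, ih]
    refine List.map_congr_left ?_
    intro p _
    rw [List.map_cons, List.sum_cons]
    ring

-- B's result in closed form
theorem pv_B_eq (profil : List (List Int)) :
    calcul_dist_approbation_alt profil =
      (pvPairs ((PySem.List.pyGetD profil 0 []).length : Int)).map (fun p =>
        (p.1, p.2, |(profil.map (fun b => pvI1 b p - pvI2 b p)).sum|)) := by
  simp only [calcul_dist_approbation_alt]
  rw [show ((PySem.List.pyRange 0 ((PySem.List.pyGetD profil 0 []).length : Int) 1).flatMap (fun k =>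
        (PySem.List.pyRange (k + 1) ((PySem.List.pyGetD profil 0 []).length : Int) 1).map (fun l => (k, l))))
      = pvPairs ((PySem.List.pyGetD profil 0 []).length : Int) from rfl]
  rw [show List.replicate (pvPairs ((PySem.List.pyGetD profil 0 []).length : Int)).length (0 : Int)
        = (pvPairs ((PySem.List.pyGetD profil 0 []).length : Int)).map (fun _ => 0) from List.map_const'.symm]
  rw [pv_acc_loop]
  rw [pv_zip_map_right]
  rw [List.foldl_map]
  rw [PySem.Dict.items_foldl_insert_fresh _ (fun p : Int × Int => p)
    (fun p => |(0 : Int) + (profil.map (fun b => pvI1 b p - pvI2 b p)).sum|) _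
    (fun p _ => PySem.Dict.contains_empty _) (by simpa using pv_nodup_pairs _),
    show (PySem.Dict.empty : PySem.Dict (Int × Int) Int).items = [] from rfl]
  simp [List.map_map, Function.comp_def]

-- ===== VERDICT (by name: the statement is the Claim_ definition above) =====
theorem calcul_dist_approbation_spec : Claim_equal_calcul_dist_approbation := by
  intro profil _ _
  unfold Spec_calcul_dist_approbation
  rw [pv_A_eq, pv_B_eq]
  refine List.map_congr_left ?_
  intro p _
  rw [pv_sum_map_sub]
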